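-- pv_equiv track=rewrite | github.com/pypi-data/pypi-mirror-103 | packages/iob2/iob2-1.1.1.tar.gz/iob2-1.1.1/iob2/__init__.py | split_sent
-- ===== SOURCE A (Python) =====
-- def flatten(orig_ls):
-- 	flatten_ls = []
-- 	for ls in orig_ls:
-- 		for e in ls:
-- 			flatten_ls.append(e)
-- 	return flatten_ls
--
-- def chunk_combine(sent_split_corpus, chunk_len):
-- 	sent_n = len(sent_split_corpus)
-- 	ret_corpus = []
-- 	chunk_buffer = []
-- 	for i in range(sent_n):
-- 		sent = sent_split_corpus[i]
-- 		if len(chunk_buffer) > 0:	# 最初の文はどのみち入れるのでチェックしない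
-- 			if len(chunk_buffer) + len(sent) > chunk_len:
-- 				ret_corpus.append(chunk_buffer)
-- 				chunk_buffer = []
-- 		for e in sent: chunk_buffer.append(e)
-- 	# 最後の文の処理
-- 	if len(chunk_buffer) > 0:
-- 		ret_corpus.append(chunk_buffer)
-- 		chunk_buffer = []
-- 	return ret_corpus
--
-- def split_sent(
-- 	original_corpus,
-- 	div_ls,
-- 	chunk_len = None	# n形態素を上限としていくつかの文をまとめる (1文が長いときはchunk_nを超えることもある; None指定の場合は1文ずつ区切る)
-- ):
-- 	# 区切り文字一覧
-- 	div_dic = {k:1 for k in div_ls}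
-- 	# flatten
-- 	flatten_corpus = flatten(original_corpus)
-- 	# 終了メタ記号を追加
-- 	div_dic[None] = 1
-- 	flatten_corpus.append([None, ""])
-- 	# 構造を見ていく
-- 	sent_split_corpus = []
-- 	sent_buff = []
-- 	for word, tag in flatten_corpus:
-- 		if word is not None: sent_buff.append((word, tag))
-- 		# 文の切れ目の場合
-- 		if word in div_dic:
-- 			if len(sent_buff) > 0:
-- 				sent_split_corpus.append(sent_buff)
-- 			sent_buff = []
-- 	# 文をいくつかずつまとめる
-- 	if chunk_len is None:
-- 		return sent_split_corpus
-- 	else: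
-- 		return chunk_combine(sent_split_corpus, chunk_len)	# 文をいくつかずつまとめる
-- ===== SOURCE B (Python) =====
-- def _emit(sent, chunk_len, result, chunk):
--     """Deliver one finished sentence: straight to the result when no chunking
--     is requested, otherwise into the running chunk buffer, flushing the buffer
--     first when adding the sentence would overflow it. Returns the new buffer."""
--     if chunk_len is None:
--         result.append(sent)
--         return chunk
--     if chunk and len(chunk) + len(sent) > chunk_len:
--         result.append(chunk)
--         chunk = []
--     return chunk + sent
--
-- def split_sent(original_corpus, div_ls, chunk_len=None):
--     dividers = set(div_ls)
--     result = []
--     chunk = []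
--     sent = []
--     for group in original_corpus:
--         for word, tag in group:
--             sent.append((word, tag))
--             if word in dividers:
--                 chunk = _emit(sent, chunk_len, result, chunk)
--                 sent = []
--     if sent:
--         chunk = _emit(sent, chunk_len, result, chunk)
--     if chunk:
--         result.append(chunk)
--     return result
-- ===== Notes on version B (the rewrite author's own statement) =====
-- stated objective: alternative
-- what changed: B fuses A's three staged passes (flatten + sentinel-driven sentence split, then a separate chunk_combine pass over the sentence list) into one streaming pass over the corpus that finalizes each sentence and merges it into the running chunk inline, with explicit end-of-input flushes instead of A's [None,''] sentinel.
import Mathlib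
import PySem

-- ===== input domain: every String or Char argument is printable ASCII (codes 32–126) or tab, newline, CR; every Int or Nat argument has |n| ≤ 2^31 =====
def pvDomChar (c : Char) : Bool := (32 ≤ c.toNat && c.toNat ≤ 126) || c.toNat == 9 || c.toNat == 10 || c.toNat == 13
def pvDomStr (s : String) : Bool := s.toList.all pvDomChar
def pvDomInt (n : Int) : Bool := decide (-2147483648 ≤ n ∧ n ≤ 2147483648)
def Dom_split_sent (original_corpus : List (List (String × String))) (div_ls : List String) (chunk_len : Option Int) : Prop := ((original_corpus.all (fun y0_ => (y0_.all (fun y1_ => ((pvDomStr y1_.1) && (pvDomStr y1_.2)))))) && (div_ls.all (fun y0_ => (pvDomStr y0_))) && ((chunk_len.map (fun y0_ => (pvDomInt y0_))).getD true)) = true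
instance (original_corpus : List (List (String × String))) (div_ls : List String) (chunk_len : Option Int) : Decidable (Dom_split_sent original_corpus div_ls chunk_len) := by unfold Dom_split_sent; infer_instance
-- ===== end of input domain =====

-- B fuses the sentence splitting and the chunk combining of A into one streaming
-- pass over the corpus (no intermediate flattened list, no sentinel, no second
-- loop over the sentence list); objective: simpler/alternative decomposition.

-- ===== PORT A =====
def pvFlatten (orig_ls : List (List (String × String))) : List (String × String) :=
  orig_ls.foldl (fun acc ls => ls.foldl (fun a e => a ++ [e]) acc) []

def pvStepCC (chunk_len : Int)
    (st : List (List (String × String)) × List (String × String))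
    (sent : List (String × String)) :
    List (List (String × String)) × List (String × String) :=
  let st := if st.2.length > 0 && ((st.2.length : Int) + (sent.length : Int) > chunk_len)
    then (st.1 ++ [st.2], ([] : List (String × String))) else st
  (st.1, st.2 ++ sent)

def pvChunkCombine (sent_split_corpus : List (List (String × String))) (chunk_len : Int) :
    List (List (String × String)) :=
  let st := sent_split_corpus.foldl (pvStepCC chunk_len) ([], [])
  if st.2.length > 0 then st.1 ++ [st.2] else st.1

def pvStepA (div_ls : List String)
    (st : List (List (String × String)) × List (String × String))
    (wt : Option String × String) :
    List (List (String × String)) × List (String × String) :=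
  let buff := match wt.1 with | some w => st.2 ++ [(w, wt.2)] | none => st.2
  let isDiv := match wt.1 with | some w => div_ls.contains w | none => true
  if isDiv then (if buff.length > 0 then st.1 ++ [buff] else st.1, []) else (st.1, buff)

def split_sent (original_corpus : List (List (String × String))) (div_ls : List String)
    (chunk_len : Option Int) : List (List (String × String)) :=
  -- the [None, ""] end-of-corpus sentinel of A becomes the (none, "") element
  let flatten_corpus : List (Option String × String) :=
    (pvFlatten original_corpus).map (fun e => (some e.1, e.2)) ++ [(none, "")]
  let st := flatten_corpus.foldl (pvStepA div_ls) ([], [])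
  match chunk_len with
  | none => st.1
  | some cl => pvChunkCombine st.1 cl

-- ===== PORT B =====
def pvEmit (sent : List (String × String)) (chunk_len : Option Int)
    (result : List (List (String × String))) (chunk : List (String × String)) :
    List (List (String × String)) × List (String × String) :=
  match chunk_len with
  | none => (result ++ [sent], chunk)
  | some cl =>
    let st := if chunk.length > 0 && ((chunk.length : Int) + (sent.length : Int) > cl)
      then (result ++ [chunk], ([] : List (String × String))) else (result, chunk)
    (st.1, st.2 ++ sent)

def pvStepB (dividers : PySem.Set String) (chunk_len : Option Int)
    (st : List (List (String × String)) × List (String × String) × List (String × String))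
    (wt : String × String) :
    List (List (String × String)) × List (String × String) × List (String × String) :=
  let sent := st.2.2 ++ [wt]
  if PySem.Set.contains dividers wt.1 then
    let rc := pvEmit sent chunk_len st.1 st.2.1
    (rc.1, rc.2, [])
  else (st.1, st.2.1, sent)

def split_sent_alt (original_corpus : List (List (String × String))) (div_ls : List String)
    (chunk_len : Option Int) : List (List (String × String)) :=
  let dividers := PySem.Set.ofList div_ls
  let st := original_corpus.foldl
    (fun st group => group.foldl (pvStepB dividers chunk_len) st) ([], [], [])
  let rc := if st.2.2.length > 0 then pvEmit st.2.2 chunk_len st.1 st.2.1 else (st.1, st.2.1)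
  if rc.2.length > 0 then rc.1 ++ [rc.2] else rc.1

-- ===== PRECONDITION & SPEC =====
def Spec_split_sent (original_corpus : List (List (String × String))) (div_ls : List String) (chunk_len : Option Int) (out : List (List (String × String))) : Prop := out = split_sent_alt original_corpus div_ls chunk_len
instance (original_corpus : List (List (String × String))) (div_ls : List String) (chunk_len : Option Int) (out : List (List (String × String))) : Decidable (Spec_split_sent original_corpus div_ls chunk_len out) := by unfold Spec_split_sent; infer_instance

-- ===== CLAIM (what is proved, stated in full; the proofs are below) =====
def Claim_equal_split_sent : Prop := ∀ (original_corpus : List (List (String × String))) (div_ls : List String) (chunk_len : Option Int), Dom_split_sent original_corpus div_ls chunk_len → Spec_split_sent original_corpus div_ls chunk_len (split_sent original_corpus div_ls chunk_len)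

-- ===== LEMMAS AND PROOFS =====

-- the list of sentences cut from the words ws, current sentence buffer buff
def pvSents (div_ls : List String) :
    List (String × String) → List (String × String) → List (List (String × String))
  | buff, [] => if buff.length > 0 then [buff] else []
  | buff, w :: ws =>
    if div_ls.contains w.1 then (buff ++ [w]) :: pvSents div_ls [] ws
    else pvSents div_ls (buff ++ [w]) ws

-- chunk combination of the sentence list ss with current chunk buffer
def pvCC (cl : Int) :
    List (String × String) → List (List (String × String)) → List (List (String × String))
  | chunk, [] => if chunk.length > 0 then [chunk] else []
  | chunk, s :: ss =>
    if chunk.length > 0 && ((chunk.length : Int) + (s.length : Int) > cl)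
    then chunk :: pvCC cl s ss
    else pvCC cl (chunk ++ s) ss

-- B's end-of-input flush (the tail of split_sent_alt, as a function of the loop state)
def pvFin (chunk_len : Option Int)
    (st : List (List (String × String)) × List (String × String) × List (String × String)) :
    List (List (String × String)) :=
  let rc := if st.2.2.length > 0 then pvEmit st.2.2 chunk_len st.1 st.2.1 else (st.1, st.2.1)
  if rc.2.length > 0 then rc.1 ++ [rc.2] else rc.1

theorem pvAlt_eq (oc : List (List (String × String))) (div_ls : List String) (chunk_len : Option Int) :
    split_sent_alt oc div_ls chunk_len
      = pvFin chunk_len (oc.foldl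
          (fun st group => group.foldl (pvStepB (PySem.Set.ofList div_ls) chunk_len) st) ([], [], [])) := rfl

theorem pvFlatten_eq (oc : List (List (String × String))) : pvFlatten oc = oc.flatten := by
  unfold pvFlatten
  rw [show (fun (acc : List (String × String)) ls =>
        ls.foldl (fun a e => a ++ [e]) acc) = (fun acc ls => acc ++ ls) from ?_,
      PySem.List.foldl_append_eq_flatten, List.nil_append]
  funext acc ls
  exact PySem.List.foldl_append_singleton_eq_self ls acc

theorem pvA_loop (div_ls : List String) (ws : List (String × String)) :
    ∀ ssc buff,
      (List.foldl (pvStepA div_ls) (ssc, buff)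
        (ws.map (fun e => (some e.1, e.2)) ++ [((none : Option String), "")])).1
      = ssc ++ pvSents div_ls buff ws := by
  induction ws with
  | nil =>
    intro ssc buff
    simp only [List.map_nil, List.nil_append, List.foldl_cons, List.foldl_nil, pvStepA, pvSents]
    by_cases h : buff.length > 0 <;> simp [h]
  | cons w ws ih =>
    intro ssc buff
    by_cases h : w.1 ∈ div_ls
    · simpa [pvStepA, pvSents, h] using ih (ssc ++ [buff ++ [w]]) []
    · simpa [pvStepA, pvSents, h] using ih ssc (buff ++ [w])

theorem pvCC_loop (cl : Int) (ss : List (List (String × String))) :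
    ∀ ret buf,
      (let st := List.foldl (pvStepCC cl) (ret, buf) ss;
       if st.2.length > 0 then st.1 ++ [st.2] else st.1)
      = ret ++ pvCC cl buf ss := by
  induction ss with
  | nil =>
    intro ret buf
    simp only [List.foldl_nil, pvCC]
    by_cases h : buf.length > 0 <;> simp [h]
  | cons s ss ih =>
    intro ret buf
    simp only [List.foldl_cons, pvStepCC, pvCC]
    by_cases h : (buf.length > 0 && ((buf.length : Int) + (s.length : Int) > cl)) = true
    · simp [h, ih]
    · simp [h, ih]

theorem pvChunkCombine_eq (ss : List (List (String × String))) (cl : Int) :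
    pvChunkCombine ss cl = pvCC cl [] ss := by
  have := pvCC_loop cl ss [] []
  simpa [pvChunkCombine] using this

theorem pvContains_ofList (div_ls : List String) (w : String) :
    PySem.Set.contains (PySem.Set.ofList div_ls) w = div_ls.contains w := by
  simp [PySem.Set.contains, PySem.Set.mem_ofList]

-- B's fused loop, chunking case
theorem pvB_loop_some (div_ls : List String) (cl : Int) (ws : List (String × String)) :
    ∀ res chunk sent,
      pvFin (some cl) (List.foldl (pvStepB (PySem.Set.ofList div_ls) (some cl)) (res, chunk, sent) ws)
      = res ++ pvCC cl chunk (pvSents div_ls sent ws) := by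
  induction ws with
  | nil =>
    intro res chunk sent
    simp only [List.foldl_nil, pvFin, pvEmit, pvSents]
    split_ifs <;> simp_all [pvCC]
  | cons w ws ih =>
    intro res chunk sent
    simp only [List.foldl_cons, pvStepB, pvContains_ofList, pvSents]
    by_cases h : w.1 ∈ div_ls
    · simp only [pvEmit]
      by_cases hc : 0 < chunk.length ∧ cl < (chunk.length : Int) + ((sent.length : Int) + 1)
      · simp [h, hc, ih, pvCC]
      · simp [h, hc, ih, pvCC]
    · simp [h, ih]

-- B's fused loop, no-chunking case (the chunk buffer stays empty)
theorem pvB_loop_none (div_ls : List String) (ws : List (String × String)) :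
    ∀ res sent,
      pvFin none (List.foldl (pvStepB (PySem.Set.ofList div_ls) none) (res, [], sent) ws)
      = res ++ pvSents div_ls sent ws := by
  induction ws with
  | nil =>
    intro res sent
    simp only [List.foldl_nil, pvFin, pvEmit, pvSents]
    by_cases hs : sent.length > 0 <;> simp [hs]
  | cons w ws ih =>
    intro res sent
    simp only [List.foldl_cons, pvStepB, pvContains_ofList, pvSents, pvEmit]
    by_cases h : w.1 ∈ div_ls
    · simp [h, ih]
    · simp [h, ih]

theorem pvB_foldl_flatten (dividers : PySem.Set String) (chunk_len : Option Int)
    (oc : List (List (String × String))) (init : List (List (String × String)) × List (String × String) × List (String × String)) :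
    oc.foldl (fun st group => group.foldl (pvStepB dividers chunk_len) st) init
      = oc.flatten.foldl (pvStepB dividers chunk_len) init := by
  induction oc generalizing init with
  | nil => simp
  | cons g oc ih => simp [List.foldl_append, ih]

-- ===== VERDICT (by name: the statement is the Claim_ definition above) =====
theorem split_sent_spec : Claim_equal_split_sent := by
  intro oc div_ls chunk_len _
  show split_sent oc div_ls chunk_len = split_sent_alt oc div_ls chunk_len
  rw [pvAlt_eq, pvB_foldl_flatten]
  cases chunk_len with
  | none =>
    rw [pvB_loop_none div_ls oc.flatten [] []]
    simp only [split_sent, pvFlatten_eq]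
    rw [pvA_loop]
  | some cl =>
    rw [pvB_loop_some div_ls cl oc.flatten [] [] []]
    simp only [split_sent, pvFlatten_eq]
    rw [pvA_loop, pvChunkCombine_eq]
    simp
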